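-- pv_equiv track=rewrite | github.com/microsoft/visualization-of-thought | src/visual-navigation/gen_all_paths.py | get_all_dir_list
-- ===== SOURCE A (Python) =====
-- from copy import deepcopy
--
-- def get_all_dir_list(cur_idx:int, rest_step:int) ->list[list[str]]:
--     dir_str = ['up', 'left', 'down', 'right']
--     dir_list = []
--     path_prefix = [dir_str[cur_idx]]
--     if rest_step == 1:
--         return [path_prefix]
--     for i in [(cur_idx + 1) % 4, (cur_idx + 3) % 4]:
--         for cand in get_all_dir_list(i, rest_step - 1):
--             cur = deepcopy(path_prefix)
--             cur.extend(cand)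
--             dir_list.append(cur)
--     return dir_list
-- ===== SOURCE B (Python) =====
-- from itertools import product
--
-- def get_all_dir_list(cur_idx: int, rest_step: int) -> list[list[str]]:
--     dir_str = ['up', 'left', 'down', 'right']
--     paths = []
--     for turns in product([1, 3], repeat=rest_step - 1):
--         idx = cur_idx
--         path = [dir_str[idx % 4]]
--         for t in turns:
--             idx = (idx + t) % 4
--             path.append(dir_str[idx])
--         paths.append(path)
--     return paths
-- ===== Notes on version B (the rewrite author's own statement) =====
-- stated objective: idiomatic
-- what changed: Replaces the branching recursion with a flat enumeration of left/right turn sequences (itertools.product([1,3], repeat=rest_step-1)), building each path by a running index sum mod 4.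
-- outside the precondition, e.g. on get_all_dir_list(0, 0): A raises RecursionError, B raises ValueError; on get_all_dir_list(5, 2): A raises IndexError, B returns [['left', 'down'], ['left', 'up']]
import Mathlib
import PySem

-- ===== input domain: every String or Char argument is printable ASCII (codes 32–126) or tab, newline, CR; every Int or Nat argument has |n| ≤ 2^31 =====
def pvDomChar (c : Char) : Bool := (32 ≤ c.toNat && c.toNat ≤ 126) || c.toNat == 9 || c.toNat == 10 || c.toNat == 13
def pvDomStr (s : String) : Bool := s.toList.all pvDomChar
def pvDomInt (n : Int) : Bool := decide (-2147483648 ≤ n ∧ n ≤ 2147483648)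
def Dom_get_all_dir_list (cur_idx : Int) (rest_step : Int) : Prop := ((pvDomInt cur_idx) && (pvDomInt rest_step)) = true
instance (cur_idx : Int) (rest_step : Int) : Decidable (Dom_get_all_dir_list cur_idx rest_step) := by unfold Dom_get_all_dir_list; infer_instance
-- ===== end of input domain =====

-- B enumerates turn sequences (itertools.product) and builds each path by a running
-- cumulative sum mod 4 instead of recursing; objective: idiomatic/alternative, same cost.

-- ===== PORT A =====
def pvDirStr : List String := ["up", "left", "down", "right"]

-- fuel = rest_step.toNat; fuel 0 means rest_step ≤ 0, where Python A diverges (excluded by Pre_)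
def pvAuxA (cur_idx : Int) (fuel : Nat) : List (List String) :=
  match PySem.List.pyGet? pvDirStr cur_idx with
  | none => []          -- dir_str[cur_idx] raises IndexError (excluded by Pre_)
  | some d =>
    match fuel with
    | 0 => []           -- Python recurses forever here (excluded by Pre_)
    | 1 => [[d]]
    | Nat.succ (Nat.succ f) =>
      [PySem.Int.mod (cur_idx + 1) 4, PySem.Int.mod (cur_idx + 3) 4].foldl
        (fun acc i =>
          (pvAuxA i (Nat.succ f)).foldl (fun acc2 cand => acc2 ++ [[d] ++ cand]) acc) []
termination_by fuel

def get_all_dir_list (cur_idx : Int) (rest_step : Int) : List (List String) :=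
  pvAuxA cur_idx rest_step.toNat

-- ===== PORT B =====
-- itertools.product([1,3], repeat=n): first coordinate varies slowest
def pvTurnSeqs : Nat → List (List Int)
  | 0 => [[]]
  | n + 1 => [(1 : Int), 3].flatMap (fun t => (pvTurnSeqs n).map (fun ts => t :: ts))

def pvDir (i : Int) : String := (PySem.List.pyGet? pvDirStr i).getD ""

def get_all_dir_list_alt (cur_idx : Int) (rest_step : Int) : List (List String) :=
  (pvTurnSeqs (rest_step - 1).toNat).foldl
    (fun paths turns =>
      let st := turns.foldl
        (fun (p : Int × List String) t =>
          let idx := PySem.Int.mod (p.1 + t) 4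
          (idx, p.2 ++ [pvDir idx]))
        (cur_idx, [pvDir (PySem.Int.mod cur_idx 4)])
      paths ++ [st.2]) []

-- ===== PRECONDITION & SPEC =====
-- Pre_ excludes rest_step ≤ 0 (A recurses forever: RecursionError) and cur_idx outside
-- [-4, 3] (dir_str[cur_idx] raises IndexError); A raises on every excluded input.
def Pre_get_all_dir_list (cur_idx : Int) (rest_step : Int) : Prop :=
  1 ≤ rest_step ∧ -4 ≤ cur_idx ∧ cur_idx < 4
instance (cur_idx : Int) (rest_step : Int) : Decidable (Pre_get_all_dir_list cur_idx rest_step) := by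
  unfold Pre_get_all_dir_list; infer_instance

def pvWitness_get_all_dir_list : Int × Int := (0, 3)

def Spec_get_all_dir_list (cur_idx : Int) (rest_step : Int) (out : List (List String)) : Prop := out = get_all_dir_list_alt cur_idx rest_step
instance (cur_idx : Int) (rest_step : Int) (out : List (List String)) : Decidable (Spec_get_all_dir_list cur_idx rest_step out) := by unfold Spec_get_all_dir_list; infer_instance

-- ===== CLAIM (what is proved, stated in full; the proofs are below) =====
def Claim_equal_get_all_dir_list : Prop := ∀ (cur_idx : Int) (rest_step : Int), Dom_get_all_dir_list cur_idx rest_step → Pre_get_all_dir_list cur_idx rest_step → Spec_get_all_dir_list cur_idx rest_step (get_all_dir_list cur_idx rest_step)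

-- ===== LEMMAS AND PROOFS =====

theorem pv_mod4_bounds (a : Int) : 0 ≤ PySem.Int.mod a 4 ∧ PySem.Int.mod a 4 < 4 := by
  rw [PySem.Int.mod_eq_emod_of_pos (by norm_num)]
  exact ⟨Int.emod_nonneg a (by norm_num), Int.emod_lt_of_pos a (by norm_num)⟩

theorem pv_mod4_idem (a : Int) : PySem.Int.mod (PySem.Int.mod a 4) 4 = PySem.Int.mod a 4 := by
  simp only [PySem.Int.mod_eq_emod_of_pos (show (0:Int) < 4 by norm_num)]
  omega

theorem pv_pyGet_dir (c : Int) (h1 : -4 ≤ c) (h2 : c < 4) :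
    PySem.List.pyGet? pvDirStr c = some (pvDir (PySem.Int.mod c 4)) := by
  interval_cases c <;> decide

theorem pv_foldl_app_map {α β : Type} (g : α → β) (L : List α) (acc : List β) :
    L.foldl (fun a c => a ++ [g c]) acc = acc ++ L.map g := by
  induction L generalizing acc with
  | nil => simp
  | cons x xs ih => simp [List.foldl, ih]

-- the direction-name suffix produced by a turn sequence starting at index i
def pvSfx (i : Int) : List Int → List String
  | [] => []
  | t :: ts => pvDir (PySem.Int.mod (i + t) 4) :: pvSfx (PySem.Int.mod (i + t) 4) ts

theorem pv_inner_fold (ts : List Int) : ∀ (i : Int) (p : List String),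
    (ts.foldl (fun (p : Int × List String) t =>
        let idx := PySem.Int.mod (p.1 + t) 4
        (idx, p.2 ++ [pvDir idx])) (i, p)).2 = p ++ pvSfx i ts := by
  induction ts with
  | nil => intro i p; simp [pvSfx]
  | cons t ts ih =>
    intro i p
    rw [List.foldl_cons]
    show (List.foldl _ ((PySem.Int.mod (i + t) 4, p ++ [pvDir (PySem.Int.mod (i + t) 4)]) : Int × List String) ts).2 = _
    rw [ih]
    simp [pvSfx]

theorem pv_alt_eq (c r : Int) :
    get_all_dir_list_alt c r =
      (pvTurnSeqs (r - 1).toNat).map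
        (fun ts => pvDir (PySem.Int.mod c 4) :: pvSfx c ts) := by
  unfold get_all_dir_list_alt
  rw [show (fun (paths : List (List String)) (turns : List Int) =>
        let st := turns.foldl
          (fun (p : Int × List String) t =>
            let idx := PySem.Int.mod (p.1 + t) 4
            (idx, p.2 ++ [pvDir idx]))
          (c, [pvDir (PySem.Int.mod c 4)])
        paths ++ [st.2]) =
      (fun paths turns => paths ++ [pvDir (PySem.Int.mod c 4) :: pvSfx c turns]) from ?_]
  · exact pv_foldl_app_map _ _ []
  · funext paths turns
    show paths ++ [(turns.foldl _ (c, [pvDir (PySem.Int.mod c 4)])).2] = _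
    rw [pv_inner_fold]
    rfl

theorem pv_main (n : Nat) : ∀ (c : Int), -4 ≤ c → c < 4 →
    pvAuxA c (n + 1) =
      (pvTurnSeqs n).map (fun ts => pvDir (PySem.Int.mod c 4) :: pvSfx c ts) := by
  induction n with
  | zero =>
    intro c h1 h2
    unfold pvAuxA
    rw [pv_pyGet_dir c h1 h2]
    rfl
  | succ n ih =>
    intro c h1 h2
    have b1 := pv_mod4_bounds (c + 1)
    have b3 := pv_mod4_bounds (c + 3)
    have e1 := ih (PySem.Int.mod (c + 1) 4) (by omega) b1.2
    have e3 := ih (PySem.Int.mod (c + 3) 4) (by omega) b3.2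
    unfold pvAuxA
    rw [pv_pyGet_dir c h1 h2]
    show [PySem.Int.mod (c + 1) 4, PySem.Int.mod (c + 3) 4].foldl _ [] = _
    rw [List.foldl_cons, List.foldl_cons, List.foldl_nil]
    show (pvAuxA (PySem.Int.mod (c + 3) 4) (n + 1)).foldl _
        ((pvAuxA (PySem.Int.mod (c + 1) 4) (n + 1)).foldl _ []) = _
    rw [pv_foldl_app_map (fun cand => [pvDir (PySem.Int.mod c 4)] ++ cand),
        pv_foldl_app_map (fun cand => [pvDir (PySem.Int.mod c 4)] ++ cand)]
    rw [e1, e3, pv_mod4_idem (c + 1), pv_mod4_idem (c + 3)]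
    rw [show pvTurnSeqs (n + 1)
        = (pvTurnSeqs n).map (fun ts => (1:Int) :: ts) ++ (pvTurnSeqs n).map (fun ts => (3:Int) :: ts)
        from by simp [pvTurnSeqs, List.flatMap]]
    simp only [List.nil_append, List.map_append, List.map_map]
    congr 1

-- ===== VERDICT (by name: the statement is the Claim_ definition above) =====
theorem get_all_dir_list_spec : Claim_equal_get_all_dir_list := by
  intro c r _hDom hPre
  obtain ⟨hr, h1, h2⟩ := hPre
  unfold Spec_get_all_dir_list get_all_dir_list
  rw [pv_alt_eq]
  have h : r.toNat = (r - 1).toNat + 1 := by omega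
  rw [h]
  exact pv_main _ c h1 h2
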